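-- pv_equiv track=rewrite | github.com/titu1994/verl | verl/utils/reward_score/custom/code_sandbox_reward.py | fix_sqrt
-- ===== SOURCE A (Python) =====
-- def fix_sqrt(string):
--     if "\\sqrt" not in string:
--         return string
--     splits = string.split("\\sqrt")
--     new_string = splits[0]
--     for split in splits[1:]:
--         if split and split[0] != "{":
--             a = split[0]
--             new_substr = "\\sqrt{" + a + "}" + split[1:]
--         else:
--             new_substr = "\\sqrt" + split
--         new_string += new_substr
--     return new_string
-- ===== SOURCE B (Python) =====
-- def fix_sqrt(string):
--     # Single left-to-right scan; no split/join.
--     out = []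
--     i, n = 0, len(string)
--     while i < n:
--         if string.startswith("\\sqrt", i):
--             out.append("\\sqrt")
--             i += 5
--             if string.startswith("\\sqrt", i):
--                 continue
--             if i < n and string[i] != "{":
--                 out.append("{" + string[i] + "}")
--                 i += 1
--         else:
--             out.append(string[i])
--             i += 1
--     return "".join(out)
-- ===== Notes on version B (the rewrite author's own statement) =====
-- stated objective: alternative
-- what changed: Replaced A's split-on-the-marker followed by a segment-rebuilding accumulation loop with a single direct left-to-right scan of the string that emits the marker and wraps the following character in braces as it goes (no split, no intermediate list of segments).
import Mathlib
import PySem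

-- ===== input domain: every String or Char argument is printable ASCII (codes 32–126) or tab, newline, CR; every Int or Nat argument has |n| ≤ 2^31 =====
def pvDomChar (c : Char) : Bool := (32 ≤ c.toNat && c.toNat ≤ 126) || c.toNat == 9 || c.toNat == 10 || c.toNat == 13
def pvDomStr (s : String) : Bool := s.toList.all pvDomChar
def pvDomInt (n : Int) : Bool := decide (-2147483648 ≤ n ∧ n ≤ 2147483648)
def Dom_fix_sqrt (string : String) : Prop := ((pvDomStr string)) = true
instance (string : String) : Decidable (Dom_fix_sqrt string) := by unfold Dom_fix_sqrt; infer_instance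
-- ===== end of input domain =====

-- B replaces A's split-on-the-marker + rebuild loop by one direct left-to-right scan (alternative decomposition, same cost).

-- ===== PORT A =====
def fix_sqrt (string : String) : String :=
  if PySem.Str.isIn "\\sqrt" string = false then string
  else
    match PySem.Chars.splitOn string.toList "\\sqrt".toList with
    | [] => string  -- unreachable: split on a nonempty separator never returns []
    | s0 :: rest =>
      String.ofList (rest.foldl
        (fun new_string split =>
          let new_substr :=
            match split with
            | a :: tail =>  -- 'split and split[0] != "{"': nonemptiness by the pattern, a = split[0], tail = split[1:]
              if a ≠ '{' then "\\sqrt{".toList ++ [a] ++ "}".toList ++ tail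
              else "\\sqrt".toList ++ (a :: tail)
            | [] => "\\sqrt".toList ++ []
          new_string ++ new_substr)
        s0)

-- ===== PORT B =====
def sepB : List Char := "\\sqrt".toList

-- the while-loop of Source B: recursion on the unread suffix; startswith = isPrefixOf
def fixAux : List Char → List Char
  | [] => []
  | c :: rest =>
    if sepB.isPrefixOf (c :: rest) then
      sepB ++
        (if sepB.isPrefixOf (rest.drop 4) then fixAux (rest.drop 4)  -- 'continue': next \\sqrt adjacent
         else match rest.drop 4 with
           | d :: _ => if d ≠ '{' then '{' :: d :: '}' :: fixAux (rest.drop 5) else fixAux (rest.drop 4)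
           | [] => [])
    else c :: fixAux rest
  termination_by l => l.length
  decreasing_by all_goals simp

def fix_sqrt_alt (string : String) : String := String.ofList (fixAux string.toList)

-- ===== PRECONDITION & SPEC =====
def Spec_fix_sqrt (string : String) (out : String) : Prop := out = fix_sqrt_alt string
instance (string : String) (out : String) : Decidable (Spec_fix_sqrt string out) := by unfold Spec_fix_sqrt; infer_instance

-- ===== CLAIM (what is proved, stated in full; the proofs are below) =====
def Claim_equal_fix_sqrt : Prop := ∀ (string : String), Dom_fix_sqrt string → Spec_fix_sqrt string (fix_sqrt string)

-- ===== LEMMAS AND PROOFS =====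

def sepL : List Char := ['\\', 's', 'q', 'r', 't']

-- a fuel-free model of PySem.Chars.splitOn · sepL
def sp : List Char → List (List Char)
  | [] => [[]]
  | c :: rest =>
    if sepL.isPrefixOf (c :: rest) then [] :: sp (rest.drop 4)
    else match sp rest with
      | p :: ps => (c :: p) :: ps
      | [] => [[c]]
  termination_by l => l.length
  decreasing_by
    · simp
    · simp

theorem sp_ne_nil (l : List Char) : sp l ≠ [] := by
  cases l with
  | nil => simp [sp]
  | cons c rest =>
    rw [sp]
    split
    · simp
    · split <;> simp

theorem go_eq (fuel : Nat) (l cur : List Char) (acc : List (List Char)) (h : l.length < fuel) :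
    PySem.Chars.splitOn.go sepL fuel l cur acc = acc.reverse ++ (sp l).modifyHead (cur.reverse ++ ·) := by
  induction fuel generalizing l cur acc with
  | zero => omega
  | succ f ih =>
    have hsl : sepL.length = 5 := rfl
    cases l with
    | nil => simp [PySem.Chars.splitOn.go, sp]
    | cons c rest =>
      rw [PySem.Chars.splitOn.go]
      by_cases hp : sepL.isPrefixOf (c :: rest) = true
      · simp only [hp, if_true]
        have hlen : (List.drop sepL.length (c :: rest)).length < f := by
          simp [hsl] at h ⊢; omega
        rw [ih _ _ _ hlen]
        rw [sp, if_pos hp]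
        simp [hsl, List.modifyHead]
        cases hsp : sp (rest.drop 4) <;> simp
      · simp only [hp]
        have hb : rest.length < f := by simp at h; omega
        rw [ih _ _ _ hb]
        rw [sp, if_neg hp]
        obtain ⟨p, ps, hps⟩ : ∃ p ps, sp rest = p :: ps := by
          cases hsp : sp rest with
          | nil => exact absurd hsp (sp_ne_nil rest)
          | cons p ps => exact ⟨p, ps, rfl⟩
        simp [hps, List.modifyHead]

theorem splitOn_eq_sp (l : List Char) : PySem.Chars.splitOn l sepL = sp l := by
  rw [PySem.Chars.splitOn, go_eq _ _ _ _ (by omega)]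
  simp [List.modifyHead]
  cases hsp : sp l <;> simp

-- A's per-segment rebuilding step
def wrap (split : List Char) : List Char :=
  match split with
  | a :: tail => if a ≠ '{' then sepL ++ '{' :: a :: '}' :: tail else sepL ++ (a :: tail)
  | [] => sepL

theorem foldl_wrap (ps : List (List Char)) (ns : List Char) :
    ps.foldl (fun a s => a ++ wrap s) ns = ns ++ (ps.map wrap).flatten := by
  induction ps generalizing ns with
  | nil => simp
  | cons p ps ih => simp [ih]

theorem sp_cons_of_ne_nil (c : Char) (rest : List Char) (hp : ¬ sepL.isPrefixOf (c :: rest) = true) :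
    ∃ p ps, sp rest = p :: ps ∧ sp (c :: rest) = (c :: p) :: ps := by
  obtain ⟨p, ps, hps⟩ : ∃ p ps, sp rest = p :: ps := by
    cases hsp : sp rest with
    | nil => exact absurd hsp (sp_ne_nil rest)
    | cons p ps => exact ⟨p, ps, rfl⟩
  refine ⟨p, ps, hps, ?_⟩
  rw [sp, if_neg hp, hps]

theorem drop5_eq (rest : List Char) : rest.drop 5 = (rest.drop 4).tail := by
  rw [List.tail_drop]

theorem fixAux_eq_glue (l : List Char) :
    fixAux l = (sp l).headD [] ++ (((sp l).tail).map wrap).flatten := by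
  induction l using fixAux.induct with
  | case1 => simp [fixAux, sp]
  | case2 c rest hp ih4 ih5 =>
    have hpL : sepL.isPrefixOf (c :: rest) = true := hp
    rw [fixAux, if_pos hp, sp, if_pos hpL]
    by_cases hp2 : sepB.isPrefixOf (rest.drop 4) = true
    · rw [if_pos hp2]
      cases heq : rest.drop 4 with
      | nil => rw [heq] at hp2; simp [sepB] at hp2
      | cons e t =>
        rw [heq] at ih4
        have hp2L : sepL.isPrefixOf (e :: t) = true := by rw [← heq]; exact hp2
        have hspe : sp (e :: t) = [] :: sp (t.drop 4) := by rw [sp, if_pos hp2L]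
        rw [ih4, hspe]
        simp [wrap, sepB, sepL]
    · rw [if_neg hp2]
      cases heq : rest.drop 4 with
      | nil => simp [sp, wrap, sepB, sepL]
      | cons d t =>
        rw [heq] at ih4
        have h5 : rest.drop 5 = t := by rw [drop5_eq, heq]; rfl
        rw [h5] at ih5
        obtain ⟨p, ps, hps, hcons⟩ :=
          sp_cons_of_ne_nil d t (by rw [← heq]; exact hp2)
        by_cases hd : d = '{'
        · subst hd
          simp [ih4, hcons, wrap, sepB, sepL]
        · simp [hd, h5, ih5, hcons, hps, wrap, sepB, sepL]
  | case3 c rest hp ih =>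
    obtain ⟨p, ps, hps, hcons⟩ := sp_cons_of_ne_nil c rest hp
    rw [fixAux, if_neg hp, hcons, ih, hps]
    simp

-- when "\sqrt" does not occur, B's scan is the identity
theorem fixAux_id (l : List Char) (h : ¬ sepL <:+: l) : fixAux l = l := by
  induction l with
  | nil => simp [fixAux]
  | cons c rest ih =>
    have hp : ¬ sepL.isPrefixOf (c :: rest) = true := by
      intro hpre
      exact h (List.IsPrefix.isInfix (by simpa using hpre))
    rw [fixAux, if_neg (by simpa [sepB, sepL] using hp)]
    rw [ih (fun hinf => h (hinf.trans (List.suffix_cons c rest).isInfix))]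

-- ===== VERDICT (by name: the statement is the Claim_ definition above) =====
theorem fix_sqrt_spec : Claim_equal_fix_sqrt := by
  intro s _
  unfold Spec_fix_sqrt fix_sqrt fix_sqrt_alt
  have hS : ("\\sqrt".toList : List Char) = sepL := rfl
  by_cases hin : PySem.Str.isIn "\\sqrt" s = false
  · rw [if_pos hin]
    have hni : ¬ sepL <:+: s.toList := by
      rw [← PySem.Chars.isIn_eq_false_iff]
      simpa [hS] using hin
    rw [fixAux_id _ hni]
    simp
  · obtain ⟨p, ps, hps⟩ : ∃ p ps, sp s.toList = p :: ps := by
      cases hsp : sp s.toList with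
      | nil => exact absurd hsp (sp_ne_nil _)
      | cons p ps => exact ⟨p, ps, rfl⟩
    have hsplit : PySem.Chars.splitOn s.toList "\\sqrt".toList = p :: ps := by
      rw [hS, splitOn_eq_sp, hps]
    rw [if_neg hin, hsplit]
    have hfn : (fun (new_string split : List Char) =>
        let new_substr :=
          match split with
          | a :: tail =>
            if a ≠ '{' then "\\sqrt{".toList ++ [a] ++ "}".toList ++ tail
            else "\\sqrt".toList ++ (a :: tail)
          | [] => "\\sqrt".toList ++ []
        new_string ++ new_substr) = fun a s => a ++ wrap s := by
      funext a t
      cases t with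
      | nil => rfl
      | cons x tl =>
        by_cases hx : x = '{' <;> simp [wrap, hx, sepL]
    simp only [hfn]
    rw [foldl_wrap, fixAux_eq_glue, hps]
    simp
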